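-- pv_equiv track=rewrite | github.com/R2D2EV/Code-Problems | CodeSignalPath/InvertNumber/invertNumber2.py | solution
-- ===== SOURCE A (Python) =====
-- def solution(n):
--     rever_num = 0
--     len_num = 0
--
--     while n > 0:
--         digit = n % 10
--         rever_num += (10 ** (len_num))  * digit + (10 ** (len_num + 1))  * digit
--         n = n // 10
--         len_num += 2
--
--     return rever_num
-- ===== SOURCE B (Python) =====
-- def solution(n):
--     if n <= 0:
--         return 0
--     return 100 * solution(n // 10) + 11 * (n % 10)
-- ===== Notes on version B (the rewrite author's own statement) =====
-- stated objective: simpler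
-- what changed: Replaces A's while loop carrying an accumulator and a position counter (two explicit powers of ten per digit) by a three-line recursion that scales the recursive result by a constant and adds an eleven-fold digit, eliminating the len_num/power bookkeeping.
import Mathlib
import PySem

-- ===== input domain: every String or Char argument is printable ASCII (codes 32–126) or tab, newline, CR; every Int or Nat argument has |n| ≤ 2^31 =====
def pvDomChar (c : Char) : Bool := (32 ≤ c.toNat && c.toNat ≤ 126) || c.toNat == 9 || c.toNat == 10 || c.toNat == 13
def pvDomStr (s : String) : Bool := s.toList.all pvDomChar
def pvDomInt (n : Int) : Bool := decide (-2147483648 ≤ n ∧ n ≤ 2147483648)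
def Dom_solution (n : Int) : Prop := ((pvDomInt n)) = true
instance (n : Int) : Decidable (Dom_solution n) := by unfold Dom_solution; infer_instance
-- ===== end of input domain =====

-- B replaces A's accumulator/position-counter while loop by a direct recursion
-- using the per-digit closed form 100*rest + 11*digit (objective: simpler).

-- termination fact for both loops, cited by name in decreasing_by
theorem pvFloordiv10_toNat_lt (n : Int) (h : 0 < n) :
    (PySem.Int.floordiv n 10).toNat < n.toNat := by
  rw [PySem.Int.floordiv_eq_ediv_of_pos (by omega : (0:Int) < 10)]
  omega

-- ===== PORT A =====
-- the while loop; len_num starts at 0 and only grows by 2, so Python's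
-- 10 ** len_num is the Nat-exponent power (10:Int) ^ len_num.toNat
def solutionLoop (n rever_num len_num : Int) : Int :=
  if h : 0 < n then
    let digit := PySem.Int.mod n 10
    solutionLoop (PySem.Int.floordiv n 10)
      (rever_num + (10:Int) ^ len_num.toNat * digit + (10:Int) ^ (len_num.toNat + 1) * digit)
      (len_num + 2)
  else rever_num
termination_by n.toNat
decreasing_by exact pvFloordiv10_toNat_lt n h

def solution (n : Int) : Int := solutionLoop n 0 0

-- ===== PORT B =====
def solution_alt (n : Int) : Int :=
  if h : n ≤ 0 then 0
  else 100 * solution_alt (PySem.Int.floordiv n 10) + 11 * (PySem.Int.mod n 10)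
termination_by n.toNat
decreasing_by exact pvFloordiv10_toNat_lt n (by omega)

-- ===== PRECONDITION & SPEC =====
def Spec_solution (n : Int) (out : Int) : Prop := out = solution_alt n
instance (n : Int) (out : Int) : Decidable (Spec_solution n out) := by unfold Spec_solution; infer_instance

-- ===== CLAIM (what is proved, stated in full; the proofs are below) =====
def Claim_equal_solution : Prop := ∀ (n : Int), Dom_solution n → Spec_solution n (solution n)

-- ===== LEMMAS AND PROOFS =====

-- unfolding of B on a positive argument
theorem solution_alt_pos (n : Int) (h : 0 < n) :
    solution_alt n = 100 * solution_alt (PySem.Int.floordiv n 10) + 11 * PySem.Int.mod n 10 := by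
  rw [solution_alt, dif_neg (show ¬ n ≤ 0 by omega)]

-- loop invariant: A's loop adds 10^len times B's value to the accumulator
theorem solutionLoop_eq (k : Nat) : ∀ (n : Int), n.toNat ≤ k → ∀ (acc len : Int), 0 ≤ len →
    solutionLoop n acc len = acc + (10:Int) ^ len.toNat * solution_alt n := by
  induction k with
  | zero =>
    intro n hn acc len hlen
    have h0 : ¬ 0 < n := by omega
    rw [solutionLoop, solution_alt]
    simp [h0, (show n ≤ 0 by omega)]
  | succ k ih =>
    intro n hn acc len hlen
    by_cases h : 0 < n
    · have hrec : (PySem.Int.floordiv n 10).toNat ≤ k := by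
        have := pvFloordiv10_toNat_lt n h
        omega
      rw [solutionLoop, dif_pos h, ih _ hrec _ (len + 2) (by omega),
        solution_alt_pos n h,
        (show (len + 2).toNat = len.toNat + 2 by omega)]
      ring
    · rw [solutionLoop, solution_alt]
      simp [h, (show n ≤ 0 by omega)]

-- ===== VERDICT (by name: the statement is the Claim_ definition above) =====
theorem solution_spec : Claim_equal_solution := by
  intro n _
  unfold Spec_solution solution
  rw [solutionLoop_eq n.toNat n le_rfl 0 0 le_rfl]
  simp
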